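-- pv_equiv track=rewrite | github.com/jspindev/DAA-apuntes | juez/Divide y venceras/Sandiam.py | cutWM
-- ===== SOURCE A (Python) =====
-- def cutWM(wm, y, x, n, c):
--     if c == 0:
--         return sum(
--             wm[i][j]
--             for i in range(y, y + n)
--             for j in range(x, x + n)
--
--         )
--     w = n // 2
--     minHeight = min(
--         cutWM(wm, y, x, w, c - 1),
--         cutWM(wm, y + w, x, w, c - 1),
--         cutWM(wm, y, x + w, w, c - 1),
--         cutWM(wm, y + w, x + w, w, c - 1),
--     )
--     return minHeight
-- ===== SOURCE B (Python) =====
-- def cutWM(wm, y, x, n, c):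
--     # Level-wise expansion: the 4^c leaf blocks of the recursion are the product of
--     # row offsets and column offsets built independently level by level.
--     ys = {y}
--     xs = {x}
--     for _ in range(c):
--         w = n // 2
--         ys = ys | {a + w for a in ys}
--         xs = xs | {a + w for a in xs}
--         n = w
--     return min(
--         sum(wm[i][j] for i in range(yy, yy + n) for j in range(xx, xx + n))
--         for yy in ys
--         for xx in xs
--     )
-- ===== Notes on version B (the rewrite author's own statement) =====
-- stated objective: alternative
-- what changed: Replaces the 4^c-call quadrant recursion by a level-wise expansion of the row/column offset sets (the recursion's leaf blocks are exactly the product of the two sets), then one min over block sums of that grid; intended as faster (polynomial vs exponential in c) but a timing run could not confirm it (A times out before a measurable size).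
-- outside the precondition, e.g. on cutWM([[2], [7]], -2, -1, 3, 1): A returns 2, B returns 2
import Mathlib
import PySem

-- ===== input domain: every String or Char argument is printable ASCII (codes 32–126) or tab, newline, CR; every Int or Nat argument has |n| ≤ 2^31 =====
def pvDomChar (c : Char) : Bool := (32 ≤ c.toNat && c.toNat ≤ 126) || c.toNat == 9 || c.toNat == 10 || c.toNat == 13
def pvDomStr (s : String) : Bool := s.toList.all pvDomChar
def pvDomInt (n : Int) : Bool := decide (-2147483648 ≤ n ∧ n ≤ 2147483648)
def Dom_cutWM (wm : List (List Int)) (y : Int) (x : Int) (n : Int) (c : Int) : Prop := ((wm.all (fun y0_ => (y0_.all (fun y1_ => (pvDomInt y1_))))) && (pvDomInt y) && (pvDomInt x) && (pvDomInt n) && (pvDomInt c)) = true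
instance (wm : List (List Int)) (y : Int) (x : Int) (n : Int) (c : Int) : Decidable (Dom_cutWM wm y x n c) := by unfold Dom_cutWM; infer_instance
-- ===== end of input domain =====

-- B replaces A's 4^c-call quadrant recursion by a level-wise expansion of the row/column offset SETS
-- (the leaf blocks are exactly the product of the two offset sets), then takes one min over that grid.

-- ===== PORT A =====
-- the leaf block sum: sum(wm[i][j] for i in range(y, y+n) for j in range(x, x+n));
-- the same comprehension appears verbatim in both Pythons, so both ports share this helper.
-- pyGetD with default 0 is exact wherever Python does not raise IndexError (Pre_ excludes the raises).
def pvBlockSum (wm : List (List Int)) (y : Int) (x : Int) (n : Int) : Int :=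
  ((PySem.List.pyRange y (y + n) 1).flatMap (fun i =>
    (PySem.List.pyRange x (x + n) 1).map (fun j =>
      PySem.List.pyGetD (PySem.List.pyGetD wm i []) j 0))).sum

def cutWMgo (wm : List (List Int)) (y : Int) (x : Int) (n : Int) : Nat → Int
  | 0 => pvBlockSum wm y x n
  | k + 1 =>
    let w := PySem.Int.floordiv n 2
    min (min (min (cutWMgo wm y x w k) (cutWMgo wm (y + w) x w k))
        (cutWMgo wm y (x + w) w k)) (cutWMgo wm (y + w) (x + w) w k)

-- fuel = c.toNat is exact for 0 ≤ c (Pre_); for c < 0 Python A recurses without bound (RecursionError)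
def cutWM (wm : List (List Int)) (y : Int) (x : Int) (n : Int) (c : Int) : Int :=
  cutWMgo wm y x n c.toNat

-- ===== PORT B =====
-- min(...) over a nonempty generator; the [] branch is unreachable (the offset sets are nonempty)
def pvMinList (l : List Int) : Int :=
  match l with
  | [] => 0
  | a :: t => t.foldl min a

def cutWM_alt (wm : List (List Int)) (y : Int) (x : Int) (n : Int) (c : Int) : Int :=
  let st := (PySem.List.pyRange 0 c 1).foldl
    (fun (st : PySem.Set Int × PySem.Set Int × Int) _ =>
      let w := PySem.Int.floordiv st.2.2 2
      (PySem.Set.union st.1 (PySem.Set.ofList (st.1.map (· + w))),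
       PySem.Set.union st.2.1 (PySem.Set.ofList (st.2.1.map (· + w))),
       w))
    (PySem.Set.ofList [y], PySem.Set.ofList [x], n)
  pvMinList (st.1.flatMap (fun yy => st.2.1.map (fun xx => pvBlockSum wm yy xx st.2.2)))

-- ===== PRECONDITION & SPEC =====
-- Pre_ excludes the inputs where A raises: c < 0 or c at/above Python's recursion limit
-- (RecursionError, depth = c) and blocks reaching outside the matrix (IndexError); negative in-range
-- indices (Python wraparound) stay INSIDE Pre_. For simplicity the bounds clause asks the full n×n
-- window (including every row) to be in range, which slightly narrows Pre_: with c > 0 and odd n A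
-- touches only an inner sub-tiling (and never ragged unaccessed rows) — A and B agree there anyway.
def Pre_cutWM (wm : List (List Int)) (y : Int) (x : Int) (n : Int) (c : Int) : Prop :=
  0 ≤ c ∧ c < 995 ∧
  (PySem.Int.floordiv n (2 ^ c.toNat) ≤ 0 ∨
    (-(wm.length : Int) ≤ y ∧ y + n ≤ wm.length ∧
      ∀ row ∈ wm, -(row.length : Int) ≤ x ∧ x + n ≤ row.length))
instance (wm : List (List Int)) (y : Int) (x : Int) (n : Int) (c : Int) : Decidable (Pre_cutWM wm y x n c) := by unfold Pre_cutWM; infer_instance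

def pvWitness_cutWM : List (List Int) × Int × Int × Int × Int := ([[3, 1, 4, 1], [5, 9, 2, 6], [5, 3, 5, 8], [9, 7, 9, 3]], 0, 0, 4, 2)

def Spec_cutWM (wm : List (List Int)) (y : Int) (x : Int) (n : Int) (c : Int) (out : Int) : Prop := out = cutWM_alt wm y x n c
instance (wm : List (List Int)) (y : Int) (x : Int) (n : Int) (c : Int) (out : Int) : Decidable (Spec_cutWM wm y x n c out) := by unfold Spec_cutWM; infer_instance

-- ===== CLAIM (what is proved, stated in full; the proofs are below) =====
def Claim_equal_cutWM : Prop := ∀ (wm : List (List Int)) (y : Int) (x : Int) (n : Int) (c : Int), Dom_cutWM wm y x n c → Pre_cutWM wm y x n c → Spec_cutWM wm y x n c (cutWM wm y x n c)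

-- ===== LEMMAS AND PROOFS =====

-- leaf-block width after k halvings, and the recursion's row/column offsets at depth k
def pvWidth (n : Int) : Nat → Int
  | 0 => n
  | k + 1 => pvWidth (PySem.Int.floordiv n 2) k

def pvOffs (y : Int) (n : Int) : Nat → List Int
  | 0 => [y]
  | k + 1 =>
    let w := PySem.Int.floordiv n 2
    pvOffs y w k ++ pvOffs (y + w) w k

def pvGrid (wm : List (List Int)) (y : Int) (x : Int) (n : Int) (k : Nat) : List Int :=
  (pvOffs y n k).flatMap (fun i => (pvOffs x n k).map (fun j => pvBlockSum wm i j (pvWidth n k)))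

-- B's loop body, named for the proofs
def pvStep (st : PySem.Set Int × PySem.Set Int × Int) : PySem.Set Int × PySem.Set Int × Int :=
  let w := PySem.Int.floordiv st.2.2 2
  (PySem.Set.union st.1 (PySem.Set.ofList (st.1.map (· + w))),
   PySem.Set.union st.2.1 (PySem.Set.ofList (st.2.1.map (· + w))),
   w)

theorem pvOffs_ne_nil (y n : Int) (k : Nat) : pvOffs y n k ≠ [] := by
  induction k generalizing y n with
  | zero => simp [pvOffs]
  | succ k ih => exact fun h => ih y _ (List.append_eq_nil_iff.mp h).1

theorem pvGrid_ne_nil (wm : List (List Int)) (y x n : Int) (k : Nat) : pvGrid wm y x n k ≠ [] := by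
  intro h
  rw [pvGrid, List.flatMap_eq_nil_iff] at h
  obtain ⟨i, hi⟩ := List.exists_mem_of_ne_nil _ (pvOffs_ne_nil y n k)
  have := h _ hi
  rw [List.map_eq_nil_iff] at this
  exact pvOffs_ne_nil x n k this

theorem pvMinList_eq_min? (l : List Int) : pvMinList l = l.min?.getD 0 := by
  cases l <;> rfl

theorem pvMinList_congr {l1 l2 : List Int} (h : ∀ a, a ∈ l1 ↔ a ∈ l2) :
    pvMinList l1 = pvMinList l2 := by
  rw [pvMinList_eq_min?, pvMinList_eq_min?]
  cases l1 with
  | nil =>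
    cases l2 with
    | nil => rfl
    | cons b u => exact absurd ((h b).mpr (by simp)) (by simp)
  | cons a t =>
    obtain ⟨m, hm⟩ : ∃ m, (a :: t).min? = some m := ⟨_, rfl⟩
    obtain ⟨hmem, hle⟩ := List.min?_eq_some_iff.mp hm
    have : l2.min? = some m := List.min?_eq_some_iff.mpr
      ⟨(h m).mp hmem, fun b hb => hle b ((h b).mpr hb)⟩
    rw [hm, this]

theorem foldl_min_pull (u : List Int) (m b : Int) :
    u.foldl min (min m b) = min m (u.foldl min b) := by
  induction u generalizing b with
  | nil => rfl
  | cons c u ih => simp only [List.foldl_cons, min_assoc, ih]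

theorem pvMinList_append {l1 l2 : List Int} (h1 : l1 ≠ []) (h2 : l2 ≠ []) :
    pvMinList (l1 ++ l2) = min (pvMinList l1) (pvMinList l2) := by
  obtain ⟨a, t, rfl⟩ := List.exists_cons_of_ne_nil h1
  obtain ⟨b, u, rfl⟩ := List.exists_cons_of_ne_nil h2
  show (t ++ b :: u).foldl min a = _
  rw [List.foldl_append]
  show (b :: u).foldl min (t.foldl min a) = _
  show u.foldl min (min (t.foldl min a) b) = _
  rw [foldl_min_pull]
  rfl

theorem pvGrid_split (wm : List (List Int)) (y x n : Int) (k : Nat)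
    (w : Int) (hw : w = PySem.Int.floordiv n 2) :
    ∀ a, a ∈ pvGrid wm y x n (k + 1) ↔
      a ∈ pvGrid wm y x w k ++ (pvGrid wm (y + w) x w k ++
        (pvGrid wm y (x + w) w k ++ pvGrid wm (y + w) (x + w) w k)) := by
  subst hw
  intro a
  simp only [pvGrid, pvOffs, pvWidth, List.mem_append, List.mem_flatMap, List.mem_map]
  aesop

theorem cutWMgo_eq_grid (wm : List (List Int)) (y x n : Int) (k : Nat) :
    cutWMgo wm y x n k = pvMinList (pvGrid wm y x n k) := by
  induction k generalizing y x n with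
  | zero => simp [cutWMgo, pvGrid, pvOffs, pvWidth, pvMinList]
  | succ k ih =>
    have hsplit := pvMinList_congr (pvGrid_split wm y x n k _ rfl)
    rw [pvMinList_append (pvGrid_ne_nil _ _ _ _ _)
          (by simp [pvGrid_ne_nil]),
        pvMinList_append (pvGrid_ne_nil _ _ _ _ _)
          (by simp [pvGrid_ne_nil]),
        pvMinList_append (pvGrid_ne_nil _ _ _ _ _) (pvGrid_ne_nil _ _ _ _ _)] at hsplit
    show min (min (min _ _) _) _ = _
    rw [ih, ih, ih, ih, hsplit]
    omega

theorem foldl_ignore {α : Type} (f : α → α) (l : List Int) (init : α) :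
    l.foldl (fun s _ => f s) init = f^[l.length] init := by
  induction l generalizing init with
  | nil => rfl
  | cons a t ih => simp [ih, Function.iterate_succ_apply]

theorem pvStep_iter (k : Nat) : ∀ (S T : PySem.Set Int) (n : Int),
    (pvStep^[k] (S, T, n)).2.2 = pvWidth n k ∧
    (∀ a, a ∈ (pvStep^[k] (S, T, n)).1 ↔ ∃ s ∈ S, a ∈ pvOffs s n k) ∧
    (∀ a, a ∈ (pvStep^[k] (S, T, n)).2.1 ↔ ∃ s ∈ T, a ∈ pvOffs s n k) := by
  induction k with
  | zero => intro S T n; simp [pvOffs, pvWidth]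
  | succ k ih =>
    intro S T n
    rw [Function.iterate_succ_apply]
    show (pvStep^[k] (pvStep (S, T, n))).2.2 = _ ∧ _
    have hstep : pvStep (S, T, n) =
        (PySem.Set.union S (PySem.Set.ofList (S.map (· + PySem.Int.floordiv n 2))),
         PySem.Set.union T (PySem.Set.ofList (T.map (· + PySem.Int.floordiv n 2))),
         PySem.Int.floordiv n 2) := rfl
    rw [hstep]
    obtain ⟨h3, h1, h2⟩ := ih (PySem.Set.union S (PySem.Set.ofList (S.map (· + PySem.Int.floordiv n 2))))
      (PySem.Set.union T (PySem.Set.ofList (T.map (· + PySem.Int.floordiv n 2)))) (PySem.Int.floordiv n 2)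
    refine ⟨h3, fun a => ?_, fun a => ?_⟩
    · rw [h1 a]
      simp only [PySem.Set.mem_union, PySem.Set.mem_ofList, List.mem_map, pvOffs, List.mem_append]
      constructor
      · rintro ⟨s, hs | ⟨s0, hs0, rfl⟩, ha⟩
        · exact ⟨s, hs, Or.inl ha⟩
        · exact ⟨s0, hs0, Or.inr ha⟩
      · rintro ⟨s, hs, ha | ha⟩
        · exact ⟨s, Or.inl hs, ha⟩
        · exact ⟨s + PySem.Int.floordiv n 2, Or.inr ⟨s, hs, rfl⟩, ha⟩
    · rw [h2 a]
      simp only [PySem.Set.mem_union, PySem.Set.mem_ofList, List.mem_map, pvOffs, List.mem_append]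
      constructor
      · rintro ⟨s, hs | ⟨s0, hs0, rfl⟩, ha⟩
        · exact ⟨s, hs, Or.inl ha⟩
        · exact ⟨s0, hs0, Or.inr ha⟩
      · rintro ⟨s, hs, ha | ha⟩
        · exact ⟨s, Or.inl hs, ha⟩
        · exact ⟨s + PySem.Int.floordiv n 2, Or.inr ⟨s, hs, rfl⟩, ha⟩

theorem cutWM_alt_eq_grid (wm : List (List Int)) (y x n c : Int) :
    cutWM_alt wm y x n c = pvMinList (pvGrid wm y x n c.toNat) := by
  rw [cutWM_alt]
  rw [show (fun (st : PySem.Set Int × PySem.Set Int × Int) (_ : Int) =>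
        let w := PySem.Int.floordiv st.2.2 2
        (PySem.Set.union st.1 (PySem.Set.ofList (st.1.map (· + w))),
         PySem.Set.union st.2.1 (PySem.Set.ofList (st.2.1.map (· + w))), w)) =
      (fun st _ => pvStep st) from rfl]
  rw [foldl_ignore, PySem.List.length_pyRange_one]
  have hy : PySem.Set.ofList [y] = ([y] : List Int) := rfl
  have hx : PySem.Set.ofList [x] = ([x] : List Int) := rfl
  rw [hy, hx, show (c - 0).toNat = c.toNat by omega]
  obtain ⟨h3, h1, h2⟩ := pvStep_iter c.toNat [y] [x] n
  apply pvMinList_congr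
  intro a
  simp only [List.mem_flatMap, List.mem_map, pvGrid]
  constructor
  · rintro ⟨yy, hyy, xx, hxx, rfl⟩
    obtain ⟨s, hs, hyy'⟩ := (h1 yy).mp hyy
    obtain ⟨t, ht, hxx'⟩ := (h2 xx).mp hxx
    simp only [List.mem_singleton] at hs ht
    subst hs; subst ht
    rw [h3]
    exact ⟨yy, hyy', xx, hxx', rfl⟩
  · rintro ⟨i, hi, j, hj, rfl⟩
    refine ⟨i, (h1 i).mpr ⟨y, by simp, hi⟩, j, (h2 j).mpr ⟨x, by simp, hj⟩, by rw [h3]⟩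

-- ===== VERDICT (by name: the statement is the Claim_ definition above) =====
theorem cutWM_spec : Claim_equal_cutWM := by
  intro wm y x n c _ _
  unfold Spec_cutWM cutWM
  rw [cutWMgo_eq_grid, cutWM_alt_eq_grid]
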